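-- pv_equiv track=rewrite | github.com/ericrihm/yt-whisper | yt_whisper/downloader.py | _find_subtitle_entry
-- ===== SOURCE A (Python) =====
-- def _find_subtitle_entry(caption_dict, lang_priority):
--     """Find best subtitle entry from a caption dict. Returns (url, ext) or None."""
--     format_priority = ["json3", "vtt", "srv1"]
--     for lang in lang_priority:
--         if lang not in caption_dict:
--             continue
--         entries = caption_dict[lang]
--         for fmt in format_priority:
--             for entry in entries:
--                 if entry.get("ext") == fmt:
--                     return entry["url"], fmt
--     return None
-- ===== SOURCE B (Python) =====
-- def _find_subtitle_entry(caption_dict, lang_priority):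
--     """Find best subtitle entry from a caption dict. Returns (url, ext) or None."""
--     for lang in lang_priority:
--         entries = caption_dict.get(lang)
--         if entries is None:
--             continue
--         index = {}
--         for entry in entries:
--             index.setdefault(entry.get("ext"), entry)
--         for fmt in ("json3", "vtt", "srv1"):
--             if fmt in index:
--                 return index[fmt]["url"], fmt
--     return None
-- ===== Notes on version B (the rewrite author's own statement) =====
-- stated objective: idiomatic
-- what changed: B builds, per candidate language, a one-pass ext->first-entry index with setdefault and then looks the three formats up in it, instead of A's rescanning the whole entry list once per format.
import Mathlib
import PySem

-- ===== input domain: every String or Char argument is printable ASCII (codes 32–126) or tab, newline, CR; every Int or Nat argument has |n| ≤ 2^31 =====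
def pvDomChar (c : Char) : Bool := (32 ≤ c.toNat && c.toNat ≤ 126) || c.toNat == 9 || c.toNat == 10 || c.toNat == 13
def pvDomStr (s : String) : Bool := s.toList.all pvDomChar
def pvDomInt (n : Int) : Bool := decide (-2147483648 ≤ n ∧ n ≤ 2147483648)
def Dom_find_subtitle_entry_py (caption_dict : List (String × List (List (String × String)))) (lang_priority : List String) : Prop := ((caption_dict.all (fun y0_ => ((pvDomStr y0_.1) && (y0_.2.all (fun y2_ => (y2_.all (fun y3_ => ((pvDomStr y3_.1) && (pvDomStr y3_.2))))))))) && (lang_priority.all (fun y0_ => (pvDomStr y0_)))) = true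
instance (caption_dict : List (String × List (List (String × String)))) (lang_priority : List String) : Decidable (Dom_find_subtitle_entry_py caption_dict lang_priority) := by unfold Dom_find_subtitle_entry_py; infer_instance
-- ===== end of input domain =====

-- B replaces A's per-format rescans of the entry list by a single ext->first-entry index
-- (setdefault) per candidate language, then three lookups (objective: idiomatic; same speed class here).

-- ===== PORT A =====
-- entry.get("ext") / caption_dict[lang]: first-match lookup in the association list (exact: Python dict lookup)
def aGet (e : List (String × String)) (k : String) : Option String :=
  match e with
  | [] => none
  | (a, b) :: rest => if a == k then some b else aGet rest k

-- 'for entry in entries: if entry.get("ext") == fmt: …' — first entry whose ext equals fmt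
def aEntryLoop (fmt : String) : List (List (String × String)) → Option (List (String × String))
  | [] => none
  | e :: es => if aGet e "ext" == some fmt then some e else aEntryLoop fmt es

-- 'for fmt in format_priority: …' ; a missing "url" on the selected entry is a Python KeyError
-- (excluded by Pre_), the port yields none there
def aFmtLoop (entries : List (List (String × String))) : List String → Option (String × String)
  | [] => none
  | fmt :: fmts =>
    match aEntryLoop fmt entries with
    | some e =>
      match aGet e "url" with
      | some u => some (u, fmt)
      | none => none
    | none => aFmtLoop entries fmts

def aLangLookup (caption_dict : List (String × List (List (String × String)))) (lang : String) :
    Option (List (List (String × String))) :=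
  match caption_dict with
  | [] => none
  | (k, v) :: rest => if k == lang then some v else aLangLookup rest lang

def aLangLoop (caption_dict : List (String × List (List (String × String)))) :
    List String → Option (String × String)
  | [] => none
  | lang :: rest =>
    match aLangLookup caption_dict lang with
    | none => aLangLoop caption_dict rest
    | some entries =>
      match aFmtLoop entries ["json3", "vtt", "srv1"] with
      | some r => some r
      | none => aLangLoop caption_dict rest

def find_subtitle_entry_py (caption_dict : List (String × List (List (String × String)))) (lang_priority : List String) : Option (String × String) :=
  aLangLoop caption_dict lang_priority

-- ===== PORT B =====
-- entry.get(k): first-match lookup written with find?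
def bGet (e : List (String × String)) (k : String) : Option String :=
  (e.find? (fun p => p.1 == k)).map (·.2)

-- 'index = {}; for entry in entries: index.setdefault(entry.get("ext"), entry)'
def bIndex (entries : List (List (String × String))) :
    PySem.Dict (Option String) (List (String × String)) :=
  entries.foldl (fun d e => d.setdefault (bGet e "ext") e) PySem.Dict.empty

-- 'for fmt in ("json3","vtt","srv1"): if fmt in index: return index[fmt]["url"], fmt'
-- (missing "url" on the indexed entry is a Python KeyError, excluded by Pre_; none there)
def bFmtLoop (index : PySem.Dict (Option String) (List (String × String))) :
    List String → Option (String × String)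
  | [] => none
  | fmt :: fmts =>
    match index.get? (some fmt) with
    | some e =>
      match bGet e "url" with
      | some u => some (u, fmt)
      | none => none
    | none => bFmtLoop index fmts

def bLangLoop (caption_dict : List (String × List (List (String × String)))) :
    List String → Option (String × String)
  | [] => none
  | lang :: rest =>
    match (caption_dict.find? (fun p => p.1 == lang)).map (·.2) with
    | none => bLangLoop caption_dict rest
    | some entries =>
      match bFmtLoop (bIndex entries) ["json3", "vtt", "srv1"] with
      | some r => some r
      | none => bLangLoop caption_dict rest

def find_subtitle_entry_py_alt (caption_dict : List (String × List (List (String × String)))) (lang_priority : List String) : Option (String × String) :=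
  bLangLoop caption_dict lang_priority

-- ===== PRECONDITION & SPEC =====
-- Pre_ excludes inputs where, under a language that occurs in lang_priority, some entry whose
-- first "ext" binding is one of the three priority formats has no "url" key: if such an entry is
-- the selected one, A (and B alike) raises KeyError; when it is merely present but not selected
-- A still returns a value, and B returns the same value there (Pre_ is slightly narrower than
-- the exact raising set for the sake of a closed form).
def Pre_find_subtitle_entry_py (caption_dict : List (String × List (List (String × String)))) (lang_priority : List String) : Prop :=
  ∀ p ∈ caption_dict, p.1 ∈ lang_priority → ∀ e ∈ p.2,
    (e.filter (fun q => q.1 = "ext")).head?.map (·.2) ∈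
        [some "json3", some "vtt", some "srv1"] →
    "url" ∈ e.map (·.1)
instance (caption_dict : List (String × List (List (String × String)))) (lang_priority : List String) : Decidable (Pre_find_subtitle_entry_py caption_dict lang_priority) := by unfold Pre_find_subtitle_entry_py; infer_instance

def pvWitness_find_subtitle_entry_py : (List (String × List (List (String × String)))) × List String :=
  ([("en", [[("ext", "srv1"), ("url", "u1")], [("ext", "vtt"), ("url", "u2")]])], ["de", "en"])

def Spec_find_subtitle_entry_py (caption_dict : List (String × List (List (String × String)))) (lang_priority : List String) (out : Option (String × String)) : Prop := out = find_subtitle_entry_py_alt caption_dict lang_priority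
instance (caption_dict : List (String × List (List (String × String)))) (lang_priority : List String) (out : Option (String × String)) : Decidable (Spec_find_subtitle_entry_py caption_dict lang_priority out) := by unfold Spec_find_subtitle_entry_py; infer_instance

-- ===== CLAIM (what is proved, stated in full; the proofs are below) =====
def Claim_equal_find_subtitle_entry_py : Prop := ∀ (caption_dict : List (String × List (List (String × String)))) (lang_priority : List String), Dom_find_subtitle_entry_py caption_dict lang_priority → Pre_find_subtitle_entry_py caption_dict lang_priority → Spec_find_subtitle_entry_py caption_dict lang_priority (find_subtitle_entry_py caption_dict lang_priority)

-- ===== LEMMAS AND PROOFS =====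

-- B's find?-based entry lookup is A's recursive lookup
lemma bGet_eq_aGet (e : List (String × String)) (k : String) : bGet e k = aGet e k := by
  induction e with
  | nil => rfl
  | cons p rest ih =>
    obtain ⟨a, b⟩ := p
    by_cases h : a == k <;> simp [bGet, aGet, List.find?, h] at ih ⊢ <;> exact ih

-- B's find?-based language lookup is A's recursive lookup
lemma bLangLookup_eq (cd : List (String × List (List (String × String)))) (lang : String) :
    (cd.find? (fun p => p.1 == lang)).map (·.2) = aLangLookup cd lang := by
  induction cd with
  | nil => rfl
  | cons p rest ih =>
    obtain ⟨a, b⟩ := p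
    by_cases h : a == lang <;> simp [aLangLookup, List.find?, h] at ih ⊢ <;> exact ih

-- the setdefault fold keeps, for every key, the FIRST entry with that ext
lemma bIndex_get (es : List (List (String × String)))
    (acc : PySem.Dict (Option String) (List (String × String))) (k : Option String) :
    (es.foldl (fun d e => d.setdefault (bGet e "ext") e) acc).get? k =
      (acc.get? k).or (es.find? (fun e => bGet e "ext" == k)) := by
  induction es generalizing acc with
  | nil => cases h : acc.get? k <;> simp [h]
  | cons e es ih =>
    simp only [List.foldl_cons, ih]
    by_cases hk : bGet e "ext" = k
    · subst hk
      rw [PySem.Dict.get?_setdefault_self]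
      cases hacc : acc.get? (bGet e "ext") <;> simp [List.find?, Option.or]
    · have hset : (acc.setdefault (bGet e "ext") e).get? k = acc.get? k := by
        apply PySem.Dict.get?_setdefault_of_ne; exact Ne.symm hk
      rw [hset]
      have hb : (bGet e "ext" == k) = false := by simpa using hk
      simp [List.find?, hb]

-- B's find? over entries is A's inner entry scan
lemma find_eq_aEntryLoop (fmt : String) (es : List (List (String × String))) :
    es.find? (fun e => bGet e "ext" == some fmt) = aEntryLoop fmt es := by
  induction es with
  | nil => rfl
  | cons e es ih =>
    have ih' : List.find? (fun e => aGet e "ext" == some fmt) es = aEntryLoop fmt es := by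
      simpa only [bGet_eq_aGet] using ih
    simp only [List.find?, aEntryLoop, bGet_eq_aGet]
    cases hc : (aGet e "ext" == some fmt) <;> simp [hc, ih']

-- dict lookup in the index coincides with A's inner entry scan
lemma bIndex_eq_aEntryLoop (es : List (List (String × String))) (fmt : String) :
    (bIndex es).get? (some fmt) = aEntryLoop fmt es := by
  rw [bIndex, bIndex_get]
  simp [find_eq_aEntryLoop]

lemma bFmtLoop_eq (es : List (List (String × String))) (fmts : List String) :
    bFmtLoop (bIndex es) fmts = aFmtLoop es fmts := by
  induction fmts with
  | nil => rfl
  | cons fmt fmts ih =>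
    simp only [bFmtLoop, aFmtLoop, bIndex_eq_aEntryLoop, ih]
    cases aEntryLoop fmt es with
    | none => rfl
    | some e => simp only [bGet_eq_aGet]

lemma bLangLoop_eq (cd : List (String × List (List (String × String)))) (ls : List String) :
    bLangLoop cd ls = aLangLoop cd ls := by
  induction ls with
  | nil => rfl
  | cons lang rest ih =>
    simp only [bLangLoop, aLangLoop, bLangLookup_eq, ih, bFmtLoop_eq]

-- ===== VERDICT (by name: the statement is the Claim_ definition above) =====
theorem find_subtitle_entry_py_spec : Claim_equal_find_subtitle_entry_py := by
  intro cd ls _ _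
  unfold Spec_find_subtitle_entry_py find_subtitle_entry_py find_subtitle_entry_py_alt
  exact (bLangLoop_eq cd ls).symm
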